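-- pv_equiv track=rewrite | github.com/sunilsoni/interview-notes-python | com/interview/2024/May/findNumOfPairs2.py | findNumOfPairs
-- ===== SOURCE A (Python) =====
-- def findNumOfPairs(a, b):
--     # Sort both lists for ordered comparison
--     a.sort()
--     b.sort()
--     i, j = 0, 0
--     count = 0
--     while i < len(a) and j < len(b):
--         # Increment j until we find a b[j] that a[i] can pair with
--         while j < len(b) and a[i] <= b[j]:
--             j += 1
--         # If we find such a b[j], count the pair and move to next a[i]
--         if j < len(b):
--             count += 1
--             j += 1  # Move to the next element in b
--         i += 1  # Move to the next element in a
--     return count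
-- ===== SOURCE B (Python) =====
-- def findNumOfPairs(a, b):
--     # Sorts a and b in place, like the original.
--     a.sort()
--     b.sort()
--     count = 0
--     for x, y in zip(a, b):
--         if x > y:
--             count += 1
--         else:
--             break
--     return count
-- ===== Notes on version B (the rewrite author's own statement) =====
-- stated objective: simpler
-- what changed: Replaces the nested two-pointer/skip loop with a single index-aligned pass over zip(sorted a, sorted b) counting while a[k] > b[k] and breaking at the first non-win; both versions sort the arguments in place.
import Mathlib
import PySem

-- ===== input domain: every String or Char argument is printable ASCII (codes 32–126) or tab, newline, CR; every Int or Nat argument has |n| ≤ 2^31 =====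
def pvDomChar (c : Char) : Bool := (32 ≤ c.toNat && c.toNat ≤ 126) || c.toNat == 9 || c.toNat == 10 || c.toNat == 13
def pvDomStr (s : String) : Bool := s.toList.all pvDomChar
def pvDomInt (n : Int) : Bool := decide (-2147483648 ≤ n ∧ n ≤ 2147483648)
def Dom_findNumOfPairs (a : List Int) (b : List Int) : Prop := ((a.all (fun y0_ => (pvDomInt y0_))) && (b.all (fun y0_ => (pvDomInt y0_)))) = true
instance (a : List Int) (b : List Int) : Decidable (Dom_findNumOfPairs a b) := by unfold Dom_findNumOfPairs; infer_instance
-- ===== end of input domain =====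

-- B replaces A's nested two-pointer/skip loop with one aligned pass over the sorted lists
-- that counts while a[k] > b[k] and breaks at the first non-win (objective: simpler).
-- Both Pythons sort their arguments in place; the equivalence proved here is about the return value.

-- ===== PORT A =====
-- inner while: 'while j < len(b) and a[i] <= b[j]: j += 1'
def pvInnerA (b : List Int) (ai : Int) (j : Nat) : Nat :=
  if _h : j < b.length ∧ ai ≤ b.getD j 0 then pvInnerA b ai (j + 1) else j
termination_by b.length - j
decreasing_by omega

-- outer while loop with state (i, j, count)
def pvOuterA (a b : List Int) (i j : Nat) (count : Int) : Int :=
  if _h : i < a.length ∧ j < b.length then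
    let j1 := pvInnerA b (a.getD i 0) j
    if j1 < b.length then pvOuterA a b (i + 1) (j1 + 1) (count + 1)
    else pvOuterA a b (i + 1) j1 count
  else count
termination_by a.length - i
decreasing_by all_goals omega

def findNumOfPairs (a : List Int) (b : List Int) : Int :=
  pvOuterA (PySem.List.sorted a (fun x => x) false) (PySem.List.sorted b (fun x => x) false) 0 0 0

-- ===== PORT B =====
-- 'for x, y in zip(a, b): if x > y: count += 1 else: break'
def pvZipCount : List Int → List Int → Int
  | x :: xs, y :: ys => if x > y then 1 + pvZipCount xs ys else 0
  | _, _ => 0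

def findNumOfPairs_alt (a : List Int) (b : List Int) : Int :=
  pvZipCount (PySem.List.sorted a (fun x => x) false) (PySem.List.sorted b (fun x => x) false)

-- ===== PRECONDITION & SPEC =====
def Spec_findNumOfPairs (a : List Int) (b : List Int) (out : Int) : Prop := out = findNumOfPairs_alt a b
instance (a : List Int) (b : List Int) (out : Int) : Decidable (Spec_findNumOfPairs a b out) := by unfold Spec_findNumOfPairs; infer_instance

-- ===== CLAIM (what is proved, stated in full; the proofs are below) =====
def Claim_equal_findNumOfPairs : Prop := ∀ (a : List Int) (b : List Int), Dom_findNumOfPairs a b → Spec_findNumOfPairs a b (findNumOfPairs a b)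

-- ===== LEMMAS AND PROOFS =====

lemma pvZipCount_nil_right (xs : List Int) : pvZipCount xs [] = 0 := by
  cases xs <;> simp [pvZipCount]

-- the inner while loop stops immediately when its condition fails
lemma pvInnerA_stop (b : List Int) (ai : Int) (j : Nat)
    (h : ¬ (j < b.length ∧ ai ≤ b.getD j 0)) : pvInnerA b ai j = j := by
  rw [pvInnerA, dif_neg h]

-- if ai ≤ every element from index j on, the inner loop runs to the end of b
lemma pvInnerA_to_end (b : List Int) (ai : Int) (j : Nat)
    (hj : j ≤ b.length)
    (hall : ∀ k, j ≤ k → k < b.length → ai ≤ b.getD k 0) :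
    pvInnerA b ai j = b.length := by
  rw [pvInnerA]
  by_cases hlt : j < b.length
  · have hle : ai ≤ b.getD j 0 := hall j le_rfl hlt
    rw [dif_pos ⟨hlt, hle⟩]
    exact pvInnerA_to_end b ai (j + 1) (by omega) (fun k hk hk' => hall k (by omega) hk')
  · have hje : j = b.length := by omega
    rw [dif_neg (by simp [hlt])]
    exact hje
termination_by b.length - j
decreasing_by omega

-- monotone access into a sorted list
lemma getD_mono_of_pairwise (b : List Int) (hb : b.Pairwise (· ≤ ·))
    (j k : Nat) (hjk : j ≤ k) (hk : k < b.length) :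
    b.getD j 0 ≤ b.getD k 0 := by
  rcases eq_or_lt_of_le hjk with h | h
  · subst h; exact le_rfl
  · rw [List.getD_eq_getElem b 0 (by omega), List.getD_eq_getElem b 0 hk]
    exact List.pairwise_iff_getElem.mp hb j k (by omega) hk h

-- main invariant: the outer loop computes count + the aligned-prefix count of the suffixes
lemma pvOuterA_eq (a b : List Int) (hb : b.Pairwise (· ≤ ·)) :
    ∀ i j count, pvOuterA a b i j count = count + pvZipCount (a.drop i) (b.drop j) := by
  intro i j count
  rw [pvOuterA]
  by_cases hij : i < a.length ∧ j < b.length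
  · have hi := hij.1
    have hj := hij.2
    have hdropa : a.drop i = a.getD i 0 :: a.drop (i + 1) := by
      rw [List.getD_eq_getElem a 0 hi]; exact List.drop_eq_getElem_cons hi
    rw [dif_pos hij]
    by_cases hgt : a.getD i 0 > b.getD j 0
    · -- a win: inner loop does not move, pair counted, both advance
      have hinner : pvInnerA b (a.getD i 0) j = j :=
        pvInnerA_stop _ _ _ (by intro hc; omega)
      simp only [hinner]
      rw [if_pos hj, pvOuterA_eq a b hb (i + 1) (j + 1) (count + 1)]
      rw [hdropa, List.drop_eq_getElem_cons hj, ← List.getD_eq_getElem b 0 hj]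
      simp only [pvZipCount, hgt, if_true]
      ring
    · -- a loss: inner loop skips to the end of b, nothing counted, outer loop dies
      have hle : a.getD i 0 ≤ b.getD j 0 := by omega
      have hinner : pvInnerA b (a.getD i 0) j = b.length :=
        pvInnerA_to_end b _ j (by omega)
          (fun k hk hk' => le_trans hle (getD_mono_of_pairwise b hb j k hk hk'))
      simp only [hinner]
      rw [if_neg (lt_irrefl _), pvOuterA_eq a b hb (i + 1) b.length count]
      rw [List.drop_length, pvZipCount_nil_right]
      rw [hdropa, List.drop_eq_getElem_cons hj, ← List.getD_eq_getElem b 0 hj]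
      simp only [pvZipCount, hgt, if_false]
  · -- loop exit: one of the suffixes is empty
    rw [dif_neg hij]
    rcases not_and_or.mp hij with h | h
    · rw [List.drop_eq_nil_of_le (by omega : a.length ≤ i)]
      simp [pvZipCount]
    · rw [List.drop_eq_nil_of_le (by omega : b.length ≤ j), pvZipCount_nil_right]
      ring
termination_by i _ _ => a.length - i
decreasing_by all_goals omega

-- ===== VERDICT (by name: the statement is the Claim_ definition above) =====
theorem findNumOfPairs_spec : Claim_equal_findNumOfPairs := by
  intro a b _
  unfold Spec_findNumOfPairs findNumOfPairs findNumOfPairs_alt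
  have hb : (PySem.List.sorted b (fun x => x) false).Pairwise (· ≤ ·) :=
    PySem.List.sorted_pairwise b (fun x => x)
  rw [pvOuterA_eq _ _ hb 0 0 0]
  simp
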